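-- pv_equiv track=rewrite | github.com/marcel-moudila/algorithme-et-programmation | polynome.py | egale
-- ===== SOURCE A (Python) =====
-- def degre(Tp):
--
--     ''' entree : un polynome Tp
-- sortie : le degre de Tp '''
--
--     n = len(Tp)
--     i = -1
--     while Tp[i] ==0 :
--         i = i - 1
--     return i + n
--
-- def egale(Tp,Tq):
--
--     ''' entree : deux tableaux de polynomes
-- sortie : le booleen True si les deux tableaux representent le meme polynome, False sinon '''
--
--     #deux polynomes sont egaux s'ils ont meme degre et les coefficients des monomes sont egaux
--
--     if degre(Tp) == degre(Tq):
--         for i in range(degre(Tp) + 1):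
--             if Tp[i] != Tq[i] :
--                 return False
--         return True
--     if degre(Tp) != degre(Tq):
--         return False
-- ===== SOURCE B (Python) =====
-- def egale(Tp, Tq):
--     n = max(len(Tp), len(Tq))
--     for i in range(n):
--         a = Tp[i] if i < len(Tp) else 0
--         b = Tq[i] if i < len(Tq) else 0
--         if a != b:
--             return False
--     return True
-- ===== Notes on version B (the rewrite author's own statement) =====
-- stated objective: simpler
-- what changed: B drops the degree computation and trailing-zero normalization entirely: it compares the two arrays pointwise in one loop over the longer length, reading a missing entry as 0 (zero-padded comparison), with no preprocessing pass.
import Mathlib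
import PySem

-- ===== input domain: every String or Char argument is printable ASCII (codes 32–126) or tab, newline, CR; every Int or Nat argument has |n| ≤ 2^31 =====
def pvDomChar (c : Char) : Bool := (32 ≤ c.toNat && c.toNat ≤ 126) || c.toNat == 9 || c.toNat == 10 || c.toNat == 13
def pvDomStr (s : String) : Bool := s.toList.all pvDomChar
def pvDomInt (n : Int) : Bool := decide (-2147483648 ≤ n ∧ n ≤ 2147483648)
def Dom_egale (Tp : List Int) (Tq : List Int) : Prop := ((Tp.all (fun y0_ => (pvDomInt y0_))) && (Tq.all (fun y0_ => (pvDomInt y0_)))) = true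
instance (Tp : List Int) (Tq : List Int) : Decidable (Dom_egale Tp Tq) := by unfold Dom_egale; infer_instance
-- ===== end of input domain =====

-- B replaces A's "compute both degrees, compare them, then loop over the common prefix"
-- by a single zero-padded pointwise scan over the longer array (objective: simpler).

-- ===== PORT A =====
-- while Tp[i] == 0: i = i - 1; return i + n   (fuel = Tp.length + 1 bounds the loop; on
-- IndexError — all-zero or empty Tp, excluded by Pre_ — the port returns a junk value)
def degreGo (Tp : List Int) : Nat → Int → Int
  | 0, i => i + Tp.length
  | f+1, i =>
    match PySem.List.pyGet? Tp i with
    | some v => if v = 0 then degreGo Tp f (i-1) else i + Tp.length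
    | none => i + Tp.length

def degre (Tp : List Int) : Int := degreGo Tp (Tp.length + 1) (-1)

-- for i in range(degre(Tp)+1): if Tp[i] != Tq[i]: return False; return True
def egaleLoop (Tp Tq : List Int) : List Int → Bool
  | [] => true
  | i :: rest =>
    if PySem.List.pyGet? Tp i ≠ PySem.List.pyGet? Tq i then false
    else egaleLoop Tp Tq rest

def egale (Tp : List Int) (Tq : List Int) : Bool :=
  if degre Tp = degre Tq then
    egaleLoop Tp Tq (PySem.List.pyRange 0 (degre Tp + 1) 1)
  else if degre Tp ≠ degre Tq then false
  else false

-- ===== PORT B =====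
-- for i in range(n): a = Tp[i] if i < len(Tp) else 0; b = …; if a != b: return False
def egaleAltLoop (Tp Tq : List Int) : List Int → Bool
  | [] => true
  | i :: rest =>
    let a := if i < (Tp.length : Int) then PySem.List.pyGetD Tp i 0 else 0
    let b := if i < (Tq.length : Int) then PySem.List.pyGetD Tq i 0 else 0
    if a ≠ b then false else egaleAltLoop Tp Tq rest

-- n = max(len(Tp), len(Tq)); loop; return True
def egale_alt (Tp : List Int) (Tq : List Int) : Bool :=
  egaleAltLoop Tp Tq (PySem.List.pyRange 0 ((max Tp.length Tq.length : Nat) : Int) 1)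

-- ===== PRECONDITION & SPEC =====
-- Pre_ excludes exactly the inputs on which A raises IndexError: a Tp or Tq that is empty
-- or consists only of zeros (degre walks off the front of the array there).
def Pre_egale (Tp : List Int) (Tq : List Int) : Prop :=
  (∃ x ∈ Tp, x ≠ 0) ∧ (∃ x ∈ Tq, x ≠ 0)
instance (Tp : List Int) (Tq : List Int) : Decidable (Pre_egale Tp Tq) := by unfold Pre_egale; infer_instance

def pvWitness_egale : List Int × List Int := ([1, 0, 2], [1, 0, 2, 0])

def Spec_egale (Tp : List Int) (Tq : List Int) (out : Bool) : Prop := out = egale_alt Tp Tq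
instance (Tp : List Int) (Tq : List Int) (out : Bool) : Decidable (Spec_egale Tp Tq out) := by unfold Spec_egale; infer_instance

-- ===== CLAIM (what is proved, stated in full; the proofs are below) =====
def Claim_equal_egale : Prop := ∀ (Tp : List Int) (Tq : List Int), Dom_egale Tp Tq → Pre_egale Tp Tq → Spec_egale Tp Tq (egale Tp Tq)

-- ===== LEMMAS AND PROOFS =====

-- proof helper: length of the significant prefix of T (index after the last nonzero entry)
def canonIdx (T : List Int) : Nat → Nat
  | 0 => 0
  | i+1 => if T.getD i 0 = 0 then canonIdx T i else i+1

theorem canonIdx_le (T : List Int) (j : Nat) : canonIdx T j ≤ j := by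
  induction j with
  | zero => simp [canonIdx]
  | succ i ih => simp only [canonIdx]; split <;> omega

theorem canonIdx_succ (T : List Int) (i : Nat) :
    canonIdx T (i+1) = if T.getD i 0 = 0 then canonIdx T i else i+1 := rfl

-- entries from the canonical index on (below j) are zero
theorem getD_zero_of_canonIdx_le (T : List Int) (j : Nat) :
    ∀ k, canonIdx T j ≤ k → k < j → T.getD k 0 = 0 := by
  induction j with
  | zero => intro k _ h2; omega
  | succ i ih =>
    intro k h1 h2
    rw [canonIdx_succ] at h1
    by_cases hz : T.getD i 0 = 0
    · rw [if_pos hz] at h1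
      rcases Nat.lt_or_ge k i with h | h
      · exact ih k h1 h
      · have : k = i := by omega
        subst this; exact hz
    · rw [if_neg hz] at h1; omega

-- the entry just before the canonical index is nonzero
theorem getD_canonIdx_pred (T : List Int) (j : Nat) :
    ∀ i, canonIdx T j = i + 1 → T.getD i 0 ≠ 0 := by
  induction j with
  | zero => intro i h; simp [canonIdx] at h
  | succ m ih =>
    intro i h
    rw [canonIdx_succ] at h
    by_cases hz : T.getD m 0 = 0
    · rw [if_pos hz] at h; exact ih i h
    · rw [if_neg hz] at h
      have : i = m := by omega
      subst this; exact hz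

theorem getD_zero_of_ge (T : List Int) (k : Nat) (h : T.length ≤ k) : T.getD k 0 = 0 := by
  simp [List.getD_eq_getElem?_getD, List.getElem?_eq_none h]

-- the two end-scanning loops agree: A's negative-index walk equals B's prefix-length walk minus one
theorem degreGo_eq (T : List Int) (j : Nat) (hj : j < T.length)
    (hnz : ∃ k, k ≤ j ∧ T.getD k 0 ≠ 0) :
    ∀ f : Nat, j < f → degreGo T f ((j : Int) - T.length) = (canonIdx T (j+1) : Int) - 1 := by
  induction j with
  | zero =>
    intro f hf
    obtain ⟨k, hk, hne⟩ := hnz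
    have hk0 : k = 0 := by omega
    subst hk0
    obtain ⟨f, rfl⟩ : ∃ f', f = f' + 1 := ⟨f - 1, by omega⟩
    have h0 : PySem.List.pyGet? T (-(T.length : Int)) = some (T.getD 0 0) := by
      rw [show (-(T.length : Int)) = -(((T.length : Nat)) : Int) from rfl,
          PySem.List.pyGet?_neg_natCast _ _ (by omega) (le_refl _)]
      simp [List.getD, List.getElem?_eq_getElem (show 0 < T.length by omega)]
    have harg : ((0 : Nat) : Int) - (T.length : Int) = -(T.length : Int) := by push_cast; ring
    rw [harg]
    simp only [degreGo, h0, if_neg hne]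
    rw [canonIdx_succ, if_neg hne]
    push_cast; omega
  | succ j ih =>
    intro f hf
    obtain ⟨f, rfl⟩ : ∃ f', f = f' + 1 := ⟨f - 1, by omega⟩
    have hget : PySem.List.pyGet? T (((j+1 : Nat) : Int) - T.length) = some (T.getD (j+1) 0) := by
      have hkle : T.length - (j+1) ≤ T.length := by omega
      have harg : (((j+1 : Nat) : Int) - T.length) = -(((T.length - (j+1) : Nat)) : Int) := by
        push_cast [Nat.cast_sub (by omega : j+1 ≤ T.length)]; ring
      rw [harg, PySem.List.pyGet?_neg_natCast _ _ (by omega) hkle]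
      have h2 : T.length - (T.length - (j+1)) = j+1 := by omega
      rw [h2, List.getElem?_eq_getElem hj]
      simp [List.getD, List.getElem?_eq_getElem hj]
    by_cases hz : T.getD (j+1) 0 = 0
    · obtain ⟨k, hk, hne⟩ := hnz
      have hk' : k ≤ j := by
        rcases Nat.lt_or_ge k (j+1) with h | h
        · omega
        · exact absurd ((show k = j+1 by omega) ▸ hz) hne
      simp only [degreGo, hget, if_pos hz]
      have harg : ((j+1 : Nat) : Int) - T.length - 1 = ((j : Nat) : Int) - T.length := by push_cast; ring
      rw [harg, ih (by omega) ⟨k, hk', hne⟩ f (by omega)]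
      rw [show canonIdx T (j+1+1) = _ from canonIdx_succ T (j+1), if_pos hz]
    · simp only [degreGo, hget, if_neg hz]
      rw [show canonIdx T (j+1+1) = _ from canonIdx_succ T (j+1), if_neg hz]
      push_cast; ring

theorem degre_eq (T : List Int) (hT : ∃ x ∈ T, x ≠ 0) :
    degre T = (canonIdx T T.length : Int) - 1 := by
  obtain ⟨x, hx, hne⟩ := hT
  obtain ⟨k, hk, rfl⟩ := List.mem_iff_getElem.mp hx
  have hn : 1 ≤ T.length := by omega
  have hnz : ∃ k', k' ≤ T.length - 1 ∧ T.getD k' 0 ≠ 0 :=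
    ⟨k, by omega, by simpa [List.getD, List.getElem?_eq_getElem hk] using hne⟩
  have h := degreGo_eq T (T.length - 1) (by omega) hnz (T.length + 1) (by omega)
  have harg : ((T.length - 1 : Nat) : Int) - T.length = -1 := by
    push_cast [Nat.cast_sub hn]; ring
  have hsucc : T.length - 1 + 1 = T.length := by omega
  rw [harg, hsucc] at h
  exact h

-- A's coefficient loop over range(c) is prefix agreement up to c
theorem egaleLoop_eq (Tp Tq : List Int) :
    ∀ (d a : Nat), a + d ≤ Tp.length → a + d ≤ Tq.length →
      egaleLoop Tp Tq (PySem.List.pyRange a (a + d) 1) =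
        decide (∀ k : Nat, a ≤ k → k < a + d → Tp.getD k 0 = Tq.getD k 0) := by
  intro d
  induction d with
  | zero =>
    intro a _ _
    rw [show ((a : Int) + (0 : Nat)) = (a : Int) by push_cast; ring,
        PySem.List.pyRange_one_eq_nil (le_refl _)]
    simp only [egaleLoop]
    symm; simp; omega
  | succ d ih =>
    intro a h1 h2
    rw [PySem.List.pyRange_one_cons (by push_cast; omega)]
    have hgp : PySem.List.pyGet? Tp ((a : Nat) : Int) = some (Tp.getD a 0) := by
      rw [PySem.List.pyGet?_natCast]
      simp [List.getD, List.getElem?_eq_getElem (by omega : a < Tp.length)]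
    have hgq : PySem.List.pyGet? Tq ((a : Nat) : Int) = some (Tq.getD a 0) := by
      rw [PySem.List.pyGet?_natCast]
      simp [List.getD, List.getElem?_eq_getElem (by omega : a < Tq.length)]
    simp only [egaleLoop, hgp, hgq]
    by_cases he : Tp.getD a 0 = Tq.getD a 0
    · rw [if_neg (by simpa using he)]
      have harg : ((a : Nat) : Int) + 1 = ((a + 1 : Nat) : Int) := by push_cast; ring
      have harg2 : ((a : Nat) : Int) + ((d + 1 : Nat) : Int) = ((a + 1 : Nat) : Int) + ((d : Nat) : Int) := by
        push_cast; ring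
      rw [harg, harg2, ih (a+1) (by omega) (by omega), decide_eq_decide]
      constructor
      · intro h k hk1 hk2
        rcases Nat.eq_or_lt_of_le hk1 with rfl | hlt
        · exact he
        · exact h k (by omega) (by omega)
      · intro h k hk1 hk2
        exact h k (by omega) (by omega)
    · rw [if_pos (by simpa using he)]
      symm
      rw [decide_eq_false_iff_not]
      intro hall
      exact he (hall a (le_refl _) (by omega))

-- the padded read in B's loop is List.getD
theorem padGet_eq (T : List Int) (k : Nat) :
    (if ((k : Nat) : Int) < (T.length : Int) then PySem.List.pyGetD T ((k : Nat) : Int) 0 else 0)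
      = T.getD k 0 := by
  by_cases h : k < T.length
  · rw [if_pos (by exact_mod_cast h), PySem.List.pyGetD_natCast]
  · rw [if_neg (by exact_mod_cast h), getD_zero_of_ge T k (by omega)]

-- B's loop over range(n) is zero-padded agreement up to n
theorem egaleAltLoop_eq (Tp Tq : List Int) :
    ∀ (d a : Nat),
      egaleAltLoop Tp Tq (PySem.List.pyRange a (a + d) 1) =
        decide (∀ k : Nat, a ≤ k → k < a + d → Tp.getD k 0 = Tq.getD k 0) := by
  intro d
  induction d with
  | zero =>
    intro a
    rw [show ((a : Int) + (0 : Nat)) = (a : Int) by push_cast; ring,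
        PySem.List.pyRange_one_eq_nil (le_refl _)]
    simp only [egaleAltLoop]
    symm; simp; omega
  | succ d ih =>
    intro a
    rw [PySem.List.pyRange_one_cons (by push_cast; omega)]
    simp only [egaleAltLoop, padGet_eq]
    by_cases he : Tp.getD a 0 = Tq.getD a 0
    · rw [if_neg (by simpa using he)]
      have harg : ((a : Nat) : Int) + 1 = ((a + 1 : Nat) : Int) := by push_cast; ring
      have harg2 : ((a : Nat) : Int) + ((d + 1 : Nat) : Int) = ((a + 1 : Nat) : Int) + ((d : Nat) : Int) := by
        push_cast; ring
      rw [harg, harg2, ih (a+1), decide_eq_decide]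
      constructor
      · intro h k hk1 hk2
        rcases Nat.eq_or_lt_of_le hk1 with rfl | hlt
        · exact he
        · exact h k (by omega) (by omega)
      · intro h k hk1 hk2
        exact h k (by omega) (by omega)
    · rw [if_pos (by simpa using he)]
      symm
      rw [decide_eq_false_iff_not]
      intro hall
      exact he (hall a (le_refl _) (by omega))

-- padded agreement up to max length forces equal canonical indices
theorem canonIdx_le_of_agree (Tp Tq : List Int) (n : Nat) (hn : Tp.length ≤ n)
    (h : ∀ k : Nat, k < n → Tp.getD k 0 = Tq.getD k 0) :
    canonIdx Tp Tp.length ≤ canonIdx Tq Tq.length := by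
  rcases Nat.eq_zero_or_pos (canonIdx Tp Tp.length) with h0 | hpos
  · omega
  · obtain ⟨m, hm⟩ : ∃ m, canonIdx Tp Tp.length = m + 1 :=
      ⟨canonIdx Tp Tp.length - 1, by omega⟩
    have hmlt : m < Tp.length := by
      have := canonIdx_le Tp Tp.length; omega
    have hTpm : Tp.getD m 0 ≠ 0 := getD_canonIdx_pred Tp Tp.length m hm
    have hTqm : Tq.getD m 0 ≠ 0 := by
      rw [← h m (by omega)]; exact hTpm
    by_contra hlt
    push Not at hlt
    rw [hm] at hlt
    rcases Nat.lt_or_ge m Tq.length with hml | hml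
    · exact hTqm (getD_zero_of_canonIdx_le Tq Tq.length m (by omega) hml)
    · exact hTqm (getD_zero_of_ge Tq m hml)

-- ===== VERDICT (by name: the statement is the Claim_ definition above) =====
theorem egale_spec : Claim_equal_egale := by
  intro Tp Tq _ hpre
  obtain ⟨hp, hq⟩ := hpre
  unfold Spec_egale
  have dp := degre_eq Tp hp
  have dq := degre_eq Tq hq
  set cp := canonIdx Tp Tp.length with hcp
  set cq := canonIdx Tq Tq.length with hcq
  have hcp_le : cp ≤ Tp.length := canonIdx_le Tp Tp.length
  have hcq_le : cq ≤ Tq.length := canonIdx_le Tq Tq.length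
  set n := max Tp.length Tq.length with hn
  unfold egale egale_alt
  rw [show ((0:Int)) = ((0 : Nat) : Int) by norm_num,
      show ((n : Nat) : Int) = ((0 : Nat) : Int) + ((n : Nat) : Int) by ring,
      egaleAltLoop_eq Tp Tq n 0]
  by_cases hc : cp = cq
  · rw [if_pos (by rw [dp, dq, hc])]
    have harg : degre Tp + 1 = ((0 : Nat) : Int) + ((cp : Nat) : Int) := by
      rw [dp]; push_cast; ring
    rw [harg, egaleLoop_eq Tp Tq cp 0 (by omega) (by omega), decide_eq_decide]
    constructor
    · intro h k _ hk
      rcases Nat.lt_or_ge k cp with hlt | hge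
      · exact h k (by omega) (by omega)
      · rw [show Tp.getD k 0 = 0 by
            rcases Nat.lt_or_ge k Tp.length with h1 | h1
            · exact getD_zero_of_canonIdx_le Tp Tp.length k hge h1
            · exact getD_zero_of_ge Tp k h1,
          show Tq.getD k 0 = 0 by
            rcases Nat.lt_or_ge k Tq.length with h1 | h1
            · exact getD_zero_of_canonIdx_le Tq Tq.length k (by omega) h1
            · exact getD_zero_of_ge Tq k h1]
    · intro h k hk1 hk2
      exact h k (by omega) (by omega)
  · have hne : degre Tp ≠ degre Tq := by
      rw [dp, dq]
      intro h
      exact hc (by exact_mod_cast (by omega : (cp : Int) = cq))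
    rw [if_neg hne, if_pos hne]
    symm
    rw [decide_eq_false_iff_not]
    intro hall
    have h1 := canonIdx_le_of_agree Tp Tq n (by omega)
      (fun k hk => hall k (by omega) (by omega))
    have h2 := canonIdx_le_of_agree Tq Tp n (by omega)
      (fun k hk => (hall k (by omega) (by omega)).symm)
    exact hc (by omega)
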